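-- pv_equiv track=rewrite | github.com/kisharra/homework_professional_python | regular/main.py | unique_names
-- ===== SOURCE A (Python) =====
-- def unique_names(data):
--     '''Find unique names'''
--     unique_names_list = []  # Create an empty list
--     unique_names = {}  # Create an empty dictionary
--
--     # Go through the list without the first line
--     for names in data[1:]:
--         key = (names[0], names[1])  # Create a key with the first and second name
--         if key not in unique_names:
--             unique_names[key] = names  # If the key is not in the dictionary, add elements to the dictionary
--         else:
--             # Go through the rest of the names
--             for i in range(2, len(names)):
--                 # If the name is not empty
--                 if names[i] != '':
--                     unique_names[key][i] = names[i]  # Add the name to the dictionary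
--
--     into_list = list(unique_names.values())  # Create a list with unique names
--     into_list.insert(0, data[0])  # Add the first line
--
--     # Return all data into a list
--     for item in into_list:
--        unique_names_list.append(item)
--
--     return unique_names_list
-- ===== SOURCE B (Python) =====
-- def unique_names(data):
--     '''Find unique names'''
--     # Pass 1: group the rows of data[1:] by (row[0], row[1]) in first-seen order.
--     groups = {}
--     for row in data[1:]:
--         groups.setdefault((row[0], row[1]), []).append(row)
--
--     # Pass 2: for each group, keep the first row's first two columns and, for every
--     # later column of the first row, the LAST non-empty value found at that column
--     # among the group's rows (falling back to the first row's value).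
--     result = [data[0]]
--     for rows in groups.values():
--         first = rows[0]
--         merged = first[:2] + [
--             next((r[i] for r in reversed(rows) if i < len(r) and r[i] != ''),
--                  first[i])
--             for i in range(2, len(first))
--         ]
--         result.append(merged)
--     return result
-- ===== Notes on version B (the rewrite author's own statement) =====
-- stated objective: alternative
-- what changed: A merges duplicate rows incrementally by mutating the stored row inside one dict-building pass; B first groups the tail rows by (row[0], row[1]) and then builds each output row column-wise, taking the last non-empty value of each column across the group, so the merge state disappears.
import Mathlib
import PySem

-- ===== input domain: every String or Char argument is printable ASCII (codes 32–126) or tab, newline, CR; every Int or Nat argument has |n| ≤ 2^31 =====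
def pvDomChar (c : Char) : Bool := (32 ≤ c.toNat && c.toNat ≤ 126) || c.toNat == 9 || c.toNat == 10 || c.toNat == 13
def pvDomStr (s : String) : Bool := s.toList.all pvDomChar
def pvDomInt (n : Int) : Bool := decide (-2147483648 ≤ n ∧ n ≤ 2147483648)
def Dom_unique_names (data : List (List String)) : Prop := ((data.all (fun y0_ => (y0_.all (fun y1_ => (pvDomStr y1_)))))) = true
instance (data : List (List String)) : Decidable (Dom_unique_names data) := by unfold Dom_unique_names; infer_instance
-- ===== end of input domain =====

-- B replaces A's single-pass dict of in-place-merged rows by a grouping pass plus a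
-- per-column last-non-empty selection; equivalence is about the RETURN value only
-- (Python A mutates the first-occurrence rows of its argument in place, B does not).

-- ===== PORT A =====
-- key = (names[0], names[1]) (shared by both ports and by Pre_)
def pvKey (r : List String) : String × String :=
  (PySem.List.pyGetD r 0 "", PySem.List.pyGetD r 1 "")

def pvAStep (d : PySem.Dict (String × String) (List String)) (names : List String) :
    PySem.Dict (String × String) (List String) :=
  let key := pvKey names
  if d.contains key = false then d.insert key names
  else
    (PySem.List.pyRange 2 (names.length : Int) 1).foldl
      (fun d i =>
        if PySem.List.pyGetD names i "" ≠ "" then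
          d.modify key [] (fun row => PySem.List.pySetD row i (PySem.List.pyGetD names i ""))
        else d) d

def unique_names (data : List (List String)) : List (List String) :=
  let unique_names_list : List (List String) := []
  let d := (PySem.List.slice data (some 1) none).foldl pvAStep PySem.Dict.empty
  let into_list := PySem.List.insert d.values 0 (PySem.List.pyGetD data 0 [])
  into_list.foldl (fun acc item => acc ++ [item]) unique_names_list

-- ===== PORT B =====
def pvGStep (d : PySem.Dict (String × String) (List (List String))) (row : List String) :
    PySem.Dict (String × String) (List (List String)) :=
  d.modify (pvKey row) [] (fun g => g ++ [row])

def pvMergeCol (rows : List (List String)) (first : List String) (i : Int) : String :=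
  match rows.reverse.find? (fun r => decide (i.toNat < r.length) && (PySem.List.pyGetD r i "" != "")) with
  | some r => PySem.List.pyGetD r i ""
  | none => PySem.List.pyGetD first i ""

def pvMerge (rows : List (List String)) : List String :=
  let first := rows.headD []
  PySem.List.slice first none (some 2) ++
    (PySem.List.pyRange 2 (first.length : Int) 1).map (pvMergeCol rows first)

def unique_names_alt (data : List (List String)) : List (List String) :=
  let groups := (PySem.List.slice data (some 1) none).foldl pvGStep PySem.Dict.empty
  PySem.List.pyGetD data 0 [] :: groups.values.map pvMerge

-- ===== PRECONDITION & SPEC =====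
-- Pre_ excludes exactly the inputs on which Python A raises IndexError: empty data
-- (data[0]), a row of data[1:] with fewer than two cells (names[1]), or a duplicate-key
-- row with a non-empty cell at an index beyond the length of its first-occurrence row
-- (the assignment unique_names[key][i] = names[i]).
def pvRowOK (tail : List (List String)) (r : List String) : Bool :=
  decide (2 ≤ r.length) &&
    ((tail.find? (fun r' => pvKey r' == pvKey r)).elim true (fun f =>
      (List.range r.length).all (fun i =>
        decide (i < 2) || (r.getD i "" == "") || decide (i < f.length))))

def Pre_unique_names (data : List (List String)) : Prop :=
  data ≠ [] ∧ ∀ r ∈ data.tail, pvRowOK data.tail r = true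

instance (data : List (List String)) : Decidable (Pre_unique_names data) := by
  unfold Pre_unique_names; infer_instance

def pvWitness_unique_names : List (List String) :=
  [["name", "surname", "phone"], ["a", "b", "1"], ["a", "b", ""], ["c", "d", "2"]]

def Spec_unique_names (data : List (List String)) (out : List (List String)) : Prop :=
  out = unique_names_alt data
instance (data : List (List String)) (out : List (List String)) : Decidable (Spec_unique_names data out) := by
  unfold Spec_unique_names; infer_instance

-- ===== CLAIM (what is proved, stated in full; the proofs are below) =====
def Claim_equal_unique_names : Prop :=
  ∀ (data : List (List String)), Dom_unique_names data → Pre_unique_names data →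
    Spec_unique_names data (unique_names data)

-- ===== LEMMAS AND PROOFS =====

-- A's in-place merge of one duplicate row into the stored row, as a pure function
def pvAUpd (m names : List String) : List String :=
  (PySem.List.pyRange 2 (names.length : Int) 1).foldl
    (fun m i =>
      if PySem.List.pyGetD names i "" ≠ "" then
        PySem.List.pySetD m i (PySem.List.pyGetD names i "")
      else m) m

-- the rows of the tail sharing key k, in order (B's group, and A's merge sequence)
def pvFilt (t : List (List String)) (k : String × String) : List (List String) :=
  t.filter (fun r => pvKey r == k)

theorem pv_getD_set (m : List String) (i : Nat) (v : String) (j : Nat) :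
    (m.set i v).getD j "" = if i = j ∧ i < m.length then v else m.getD j "" := by
  simp only [List.getD_eq_getElem?_getD, List.getElem?_set]
  split_ifs <;> simp_all
  omega
def pvSetStep (r : List String) (m : List String) (k : Nat) : List String :=
  if r.getD (2 + k) "" ≠ "" then m.set (2 + k) (r.getD (2 + k) "") else m
theorem pvAUpd_eq_setfold (m r : List String) :
    pvAUpd m r = (List.range (r.length - 2)).foldl (pvSetStep r) m := by
  unfold pvAUpd
  rw [PySem.List.pyRange_one]
  have h : ((r.length : Int) - 2).toNat = r.length - 2 := by omega
  rw [h, List.foldl_map]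
  congr 1
  funext m k
  have hc : (2 : Int) + (k : Int) = ((2 + k : Nat) : Int) := by push_cast; ring
  rw [hc]
  simp only [PySem.List.pyGetD_natCast, PySem.List.pySetD_natCast, pvSetStep]
theorem pv_setfold_length (r : List String) :
    ∀ (c : Nat) (m : List String), ((List.range c).foldl (pvSetStep r) m).length = m.length := by
  intro c
  induction c with
  | zero => simp
  | succ c ih =>
    intro m
    rw [List.range_succ, List.foldl_append]
    simp only [List.foldl_cons, List.foldl_nil, pvSetStep]
    split_ifs <;> simp [ih]
theorem pv_setfold_getD (r : List String) (j : Nat) :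
    ∀ (c : Nat) (m : List String),
      ((List.range c).foldl (pvSetStep r) m).getD j "" =
        if 2 ≤ j ∧ j < m.length ∧ j < 2 + c ∧ r.getD j "" ≠ "" then r.getD j ""
        else m.getD j "" := by
  intro c
  induction c with
  | zero => intro m; simp; intro h1 h2 h3; omega
  | succ c ih =>
    intro m
    rw [List.range_succ, List.foldl_append]
    simp only [List.foldl_cons, List.foldl_nil, pvSetStep]
    have hlen := pv_setfold_length r c m
    by_cases h : r.getD (2 + c) "" ≠ ""
    · rw [if_pos h, pv_getD_set, hlen, ih]
      by_cases he : 2 + c = j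
      · subst he
        by_cases hm : 2 + c < m.length
        · rw [if_pos ⟨rfl, hm⟩, if_pos ⟨by omega, hm, by omega, h⟩]
        · rw [if_neg (fun hh => hm hh.2), if_neg (fun hh => hm hh.2.1),
              if_neg (fun hh => hm hh.2.1)]
      · rw [if_neg (fun hh => he hh.1)]
        by_cases hP : 2 ≤ j ∧ j < m.length ∧ j < 2 + c ∧ r.getD j "" ≠ ""
        · rw [if_pos hP, if_pos ⟨hP.1, hP.2.1, by omega, hP.2.2.2⟩]
        · rw [if_neg hP, if_neg (fun hh => hP ⟨hh.1, hh.2.1,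
            by have : j ≠ 2 + c := fun e => he e.symm; omega, hh.2.2.2⟩)]
    · rw [if_neg h, ih]
      by_cases hP : 2 ≤ j ∧ j < m.length ∧ j < 2 + c ∧ r.getD j "" ≠ ""
      · rw [if_pos hP, if_pos ⟨hP.1, hP.2.1, by omega, hP.2.2.2⟩]
      · rw [if_neg hP, if_neg (fun hh => hP ⟨hh.1, hh.2.1,
          by have : j ≠ 2 + c := fun e => hh.2.2.2 (e ▸ (not_not.mp h)); omega, hh.2.2.2⟩)]
theorem pvAUpd_length (m r : List String) : (pvAUpd m r).length = m.length := by
  rw [pvAUpd_eq_setfold]; exact pv_setfold_length r _ m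
theorem pvAUpd_getD (m r : List String) (j : Nat) :
    (pvAUpd m r).getD j "" =
      if 2 ≤ j ∧ j < m.length ∧ j < r.length ∧ r.getD j "" ≠ "" then r.getD j ""
      else m.getD j "" := by
  rw [pvAUpd_eq_setfold, pv_setfold_getD]
  have hiff : (2 ≤ j ∧ j < m.length ∧ j < 2 + (r.length - 2) ∧ r.getD j "" ≠ "") ↔
      (2 ≤ j ∧ j < m.length ∧ j < r.length ∧ r.getD j "" ≠ "") := by
    constructor <;> rintro ⟨a, b, c, d⟩ <;> exact ⟨a, b, by omega, d⟩
  rw [if_congr hiff rfl rfl]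
theorem pv_foldA_length : ∀ (rest : List (List String)) (f : List String),
    (rest.foldl pvAUpd f).length = f.length := by
  intro rest
  induction rest with
  | nil => intro f; rfl
  | cons r rest ih => intro f; rw [List.foldl_cons, ih, pvAUpd_length]
theorem pv_foldA_getD (j : Nat) (h2 : 2 ≤ j) :
    ∀ (rest : List (List String)) (f : List String), j < f.length →
      (rest.foldl pvAUpd f).getD j "" =
        match rest.reverse.find? (fun r => decide (j < r.length) && (r.getD j "" != "")) with
        | some r => r.getD j ""
        | none => f.getD j "" := by
  intro rest
  induction rest using List.reverseRecOn with
  | nil => intro f _; rfl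
  | append_singleton rest r ih =>
    intro f hf
    rw [List.foldl_append, List.foldl_cons, List.foldl_nil, pvAUpd_getD,
        pv_foldA_length rest f, List.reverse_append]
    simp only [List.reverse_cons, List.reverse_nil, List.nil_append, List.singleton_append,
      List.find?_cons]
    by_cases hp : j < r.length ∧ r.getD j "" ≠ ""
    · rw [if_pos ⟨h2, hf, hp.1, hp.2⟩]
      have : (decide (j < r.length) && (r.getD j "" != "")) = true := by
        rw [decide_eq_true hp.1, Bool.true_and]
        exact bne_iff_ne.mpr hp.2
      rw [this]
    · rw [if_neg (fun hh => hp ⟨hh.2.2.1, hh.2.2.2⟩)]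
      have : (decide (j < r.length) && (r.getD j "" != "")) = false := by
        by_cases hq : j < r.length
        · have hg : r.getD j "" = "" := by by_contra hne; exact hp ⟨hq, hne⟩
          rw [List.getD_eq_getElem?_getD] at hg
          simp [hg]
        · simp [hq]
      rw [this, ih f hf]
theorem pv_foldA_getD_lt2 (j : Nat) (hj : j < 2) :
    ∀ (rest : List (List String)) (f : List String),
      (rest.foldl pvAUpd f).getD j "" = f.getD j "" := by
  intro rest
  induction rest with
  | nil => intro f; rfl
  | cons r rest ih =>
    intro f
    rw [List.foldl_cons, ih, pvAUpd_getD, if_neg (fun hh => by omega)]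
theorem pvMerge_cons_eq (f : List String) (rest : List (List String)) :
    pvMerge (f :: rest) =
      f.take 2 ++ (PySem.List.pyRange 2 (f.length : Int) 1).map (pvMergeCol (f :: rest) f) := by
  show PySem.List.slice f none (some 2) ++ _ = _
  rw [PySem.List.slice_to f (by omega)]
  simp
theorem pvMerge_length (f : List String) (rest : List (List String)) :
    (pvMerge (f :: rest)).length = f.length := by
  rw [pvMerge_cons_eq, List.length_append, List.length_take, List.length_map,
      PySem.List.length_pyRange_one]
  omega
theorem pvMergeCol_eq (f : List String) (rest : List (List String)) (j : Nat)
    (hj : j < f.length) :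
    pvMergeCol (f :: rest) f (j : Int) =
      match rest.reverse.find? (fun r => decide (j < r.length) && (r.getD j "" != "")) with
      | some r => r.getD j ""
      | none => f.getD j "" := by
  unfold pvMergeCol
  have hpred : (fun (r : List String) => decide ((j : Int).toNat < r.length) && (PySem.List.pyGetD r (j : Int) "" != ""))
      = (fun r => decide (j < r.length) && (r.getD j "" != "")) := by
    funext r
    simp [PySem.List.pyGetD_natCast]
    rfl
  rw [hpred, List.reverse_cons, List.find?_append]
  cases hfind : rest.reverse.find? (fun r => decide (j < r.length) && (r.getD j "" != "")) with
  | some r =>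
    simp only [Option.some_or]
    simp [PySem.List.pyGetD_natCast]
  | none =>
    simp only [Option.none_or]
    rw [List.find?_singleton]
    by_cases hg : f.getD j "" ≠ ""
    · rw [if_pos (by rw [decide_eq_true hj, Bool.true_and]; exact bne_iff_ne.mpr hg)]
      simp [PySem.List.pyGetD_natCast]
    · rw [if_neg ?_]
      · simp [PySem.List.pyGetD_natCast]
      · have hg' : f.getD j "" = "" := not_not.mp hg
        rw [List.getD_eq_getElem?_getD] at hg'
        simp [hg']
theorem pvMerge_getD (f : List String) (rest : List (List String)) (j : Nat)
    (hj : j < f.length) :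
    (pvMerge (f :: rest)).getD j "" =
      if j < 2 then f.getD j "" else pvMergeCol (f :: rest) f (j : Int) := by
  rw [pvMerge_cons_eq]
  by_cases hc : j < 2
  · rw [if_pos hc]
    have hl : j < (f.take 2).length := by simp [List.length_take]; omega
    simp [List.getD_eq_getElem?_getD, List.getElem?_append_left hl, hc]
  · rw [if_neg hc]
    have hl : (f.take 2).length ≤ j := by simp [List.length_take]; omega
    have hlen2 : (f.take 2).length = 2 := by simp [List.length_take]; omega
    have hk : j - 2 < ((f.length : Int) - 2).toNat := by omega
    have hval : (PySem.List.pyRange 2 (f.length : Int) 1)[j - 2]? = some ((j : Int)) := by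
      rw [List.getElem?_eq_getElem (by rwa [PySem.List.length_pyRange_one]),
          PySem.List.getElem_pyRange_one]
      congr 1
      omega
    simp only [List.getD_eq_getElem?_getD, List.getElem?_append_right hl, hlen2,
      List.getElem?_map, hval, Option.map_some, Option.getD_some]
theorem pv_crux (rest : List (List String)) (f : List String) :
    rest.foldl pvAUpd f = pvMerge (f :: rest) := by
  apply List.ext_getElem (by rw [pv_foldA_length, pvMerge_length])
  intro j h1 hh2
  have hj : j < f.length := by rwa [pv_foldA_length] at h1
  rw [← List.getD_eq_getElem _ "" h1, ← List.getD_eq_getElem _ "" hh2,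
      pvMerge_getD f rest j hj]
  by_cases hc : j < 2
  · rw [if_pos hc, pv_foldA_getD_lt2 j hc]
  · rw [if_neg hc, pv_foldA_getD j (by omega) rest f hj, pvMergeCol_eq f rest j hj]
theorem pvInner_get? (names : List String) (key : String × String) :
    ∀ (L : List Int) (d : PySem.Dict (String × String) (List String)) (m : List String),
      d.get? key = some m → ∀ k',
      ((L.foldl (fun d i =>
          if PySem.List.pyGetD names i "" ≠ "" then
            d.modify key [] (fun row => PySem.List.pySetD row i (PySem.List.pyGetD names i ""))
          else d) d).get? k') =
        if k' = key then
          some (L.foldl (fun m i =>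
            if PySem.List.pyGetD names i "" ≠ "" then
              PySem.List.pySetD m i (PySem.List.pyGetD names i "")
            else m) m)
        else d.get? k' := by
  intro L
  induction L with
  | nil =>
    intro d m hm k'
    simp only [List.foldl_nil]
    split_ifs with h
    · subst h; exact hm
    · rfl
  | cons i L ih =>
    intro d m hm k'
    simp only [List.foldl_cons]
    by_cases hg : PySem.List.pyGetD names i "" ≠ ""
    · rw [if_pos hg, if_pos hg]
      have hget : (d.modify key [] (fun row => PySem.List.pySetD row i (PySem.List.pyGetD names i ""))).get? key
          = some (PySem.List.pySetD m i (PySem.List.pyGetD names i "")) := by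
        show (d.insert key _).get? key = _
        have hd : d.getD key [] = m := PySem.Dict.getD_of_get?_eq_some d [] hm
        simp only [PySem.Dict.get?_insert_self, hd]
      rw [ih _ _ hget k']
      split_ifs with h
      · rfl
      · show (d.insert key _).get? k' = d.get? k'
        exact PySem.Dict.get?_insert_of_ne d _ h
    · rw [if_neg hg, if_neg hg]
      exact ih d m hm k'
theorem pvInner_keys (names : List String) (key : String × String) :
    ∀ (L : List Int) (d : PySem.Dict (String × String) (List String)),
      d.contains key = true →
      (L.foldl (fun d i =>
          if PySem.List.pyGetD names i "" ≠ "" then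
            d.modify key [] (fun row => PySem.List.pySetD row i (PySem.List.pyGetD names i ""))
          else d) d).keys = d.keys := by
  intro L
  induction L with
  | nil => intro d _; rfl
  | cons i L ih =>
    intro d hc
    simp only [List.foldl_cons]
    by_cases hg : PySem.List.pyGetD names i "" ≠ ""
    · rw [if_pos hg]
      have h1 : (d.modify key [] (fun row => PySem.List.pySetD row i (PySem.List.pyGetD names i ""))).contains key = true := by
        show (d.insert key _).contains key = true
        exact PySem.Dict.contains_insert_self d key _
      rw [ih _ h1]
      exact PySem.Dict.keys_insert_of_contains d _ hc
    · rw [if_neg hg]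
      exact ih d hc
theorem pvAStep_def (d : PySem.Dict (String × String) (List String)) (r : List String) :
    pvAStep d r = if d.contains (pvKey r) = false then d.insert (pvKey r) r
      else (PySem.List.pyRange 2 (r.length : Int) 1).foldl
        (fun d i =>
          if PySem.List.pyGetD r i "" ≠ "" then
            d.modify (pvKey r) [] (fun row => PySem.List.pySetD row i (PySem.List.pyGetD r i ""))
          else d) d := rfl
theorem pvA_get? : ∀ (t : List (List String)) (k : String × String),
    ((t.foldl pvAStep PySem.Dict.empty).get? k) =
      match pvFilt t k with
      | [] => none
      | f :: rest => some (rest.foldl pvAUpd f) := by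
  intro t
  induction t using List.reverseRecOn with
  | nil => intro k; simp [pvFilt, PySem.Dict.get?_empty]
  | append_singleton t r ih =>
    intro k
    rw [List.foldl_append, List.foldl_cons, List.foldl_nil]
    have hfilt : pvFilt (t ++ [r]) k
        = pvFilt t k ++ (if pvKey r == k then [r] else []) := by
      simp [pvFilt, List.filter_append]
      split_ifs <;> simp_all
    rw [pvAStep_def]
    set dA := t.foldl pvAStep PySem.Dict.empty with hdA
    by_cases hc : dA.contains (pvKey r) = false
    · rw [if_pos hc]
      have hnone : dA.get? (pvKey r) = none := by
        rw [PySem.Dict.contains_eq_isSome_get?] at hc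
        exact Option.not_isSome_iff_eq_none.mp (by simp [hc])
      by_cases hk : k = pvKey r
      · subst hk
        rw [PySem.Dict.get?_insert_self]
        have h0 : pvFilt t (pvKey r) = [] := by
          have := ih (pvKey r)
          rw [hnone] at this
          cases h : pvFilt t (pvKey r) with
          | nil => rfl
          | cons f rest => rw [h] at this; exact absurd this.symm (by simp)
        rw [hfilt, h0, if_pos (by simp)]
        rfl
      · rw [PySem.Dict.get?_insert_of_ne dA r hk, hfilt,
            if_neg (by simp; exact fun e => hk e.symm), List.append_nil]
        exact ih k
    · rw [if_neg hc]
      have hc' : dA.contains (pvKey r) = true := by revert hc; cases dA.contains (pvKey r) <;> simp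
      have hsome : ∃ m, dA.get? (pvKey r) = some m := by
        rw [PySem.Dict.contains_eq_isSome_get?] at hc'
        exact Option.isSome_iff_exists.mp hc'
      obtain ⟨m, hm⟩ := hsome
      have hfr : ∃ f rest, pvFilt t (pvKey r) = f :: rest ∧ m = rest.foldl pvAUpd f := by
        have := ih (pvKey r)
        rw [hm] at this
        cases h : pvFilt t (pvKey r) with
        | nil => rw [h] at this; exact absurd this (by simp)
        | cons f rest =>
          rw [h] at this
          exact ⟨f, rest, rfl, by simpa using this⟩
      obtain ⟨f, rest, hfr1, hfr2⟩ := hfr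
      rw [pvInner_get? r (pvKey r) _ dA m hm k]
      by_cases hk : k = pvKey r
      · subst hk
        rw [if_pos rfl, hfilt, hfr1, if_pos (by simp)]
        have : (PySem.List.pyRange 2 ((r.length : Int)) 1).foldl
            (fun m i => if PySem.List.pyGetD r i "" ≠ "" then PySem.List.pySetD m i (PySem.List.pyGetD r i "") else m) m
            = pvAUpd m r := rfl
        rw [this, hfr2]
        show _ = some ((rest ++ [r]).foldl pvAUpd f)
        rw [List.foldl_append, List.foldl_cons, List.foldl_nil]
      · rw [if_neg hk, hfilt, if_neg (by simp; exact fun e => hk e.symm), List.append_nil]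
        exact ih k
theorem pvGStep_def (d : PySem.Dict (String × String) (List (List String))) (r : List String) :
    pvGStep d r = d.insert (pvKey r) ((d.getD (pvKey r) []) ++ [r]) := rfl
theorem pvGStep_eta : pvGStep = fun d row => d.modify (pvKey row) [] (· ++ [row]) := rfl
theorem pv_keys_eq : ∀ (t : List (List String))
    (dA : PySem.Dict (String × String) (List String))
    (dG : PySem.Dict (String × String) (List (List String))),
    dA.keys = dG.keys → (t.foldl pvAStep dA).keys = (t.foldl pvGStep dG).keys := by
  intro t
  induction t with
  | nil => intro dA dG h; exact h
  | cons r t ih =>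
    intro dA dG h
    rw [List.foldl_cons, List.foldl_cons]
    apply ih
    have hcc : dA.contains (pvKey r) = dG.contains (pvKey r) := by
      rw [PySem.Dict.contains_eq_decide_mem_keys, PySem.Dict.contains_eq_decide_mem_keys, h]
    rw [pvAStep_def, pvGStep_def]
    by_cases hc : dA.contains (pvKey r) = false
    · rw [if_pos hc]
      rw [PySem.Dict.keys_insert_of_not_contains dA r hc,
          PySem.Dict.keys_insert_of_not_contains dG _ (by rw [← hcc]; exact hc), h]
    · have hc' : dA.contains (pvKey r) = true := by revert hc; cases dA.contains (pvKey r) <;> simp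
      rw [if_neg hc]
      rw [pvInner_keys r (pvKey r) _ dA hc', h,
          PySem.Dict.keys_insert_of_contains dG _ (by rw [← hcc]; exact hc')]
theorem pvG_getD (t : List (List String)) (k : String × String) :
    (t.foldl pvGStep PySem.Dict.empty).getD k [] = pvFilt t k := by
  have h1 : t.foldl pvGStep PySem.Dict.empty
      = (t.map (fun r => (pvKey r, r))).foldl (fun d p => d.modify p.1 [] (· ++ [p.2])) PySem.Dict.empty := by
    rw [pvGStep_eta, List.foldl_map]
  rw [h1, PySem.Dict.getD_foldl_modify_append _ _ k, PySem.Dict.getD_empty, List.nil_append,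
      List.filter_map]
  simp [pvFilt, Function.comp_def]
theorem pvG_keys (t : List (List String)) :
    (t.foldl pvGStep PySem.Dict.empty).keys = PySem.Set.ofList (t.map pvKey) := by
  have := PySem.Dict.keys_foldl_modify_key t pvKey [] (fun _ r => (· ++ [r]))
      (PySem.Dict.empty (κ := String × String) (ν := List (List String)))
  rw [pvGStep_eta]
  rw [show (fun (d : PySem.Dict (String × String) (List (List String))) (row : List String) => d.modify (pvKey row) [] (· ++ [row]))
      = (fun d x => d.modify (pvKey x) [] ((fun _ r => (· ++ [r])) d x)) from rfl]
  rw [this, PySem.Dict.keys_empty, PySem.Set.update_nil_left]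
theorem pvG_nodup (t : List (List String)) :
    (t.foldl pvGStep PySem.Dict.empty).keys.Nodup := by
  rw [pvG_keys]; exact PySem.Set.nodup_ofList _
theorem pvG_mem_keys_filt (t : List (List String)) (k : String × String)
    (hk : k ∈ (t.foldl pvGStep PySem.Dict.empty).keys) : pvFilt t k ≠ [] := by
  rw [pvG_keys] at hk
  have hk' : k ∈ t.map pvKey := (PySem.Set.mem_ofList _ _).mp hk
  obtain ⟨r, hr, hkr⟩ := List.mem_map.mp hk'
  exact List.ne_nil_of_mem (List.mem_filter.mpr ⟨hr, by simp [hkr]⟩)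
theorem pv_insert_zero (xs : List (List String)) (x : List String) :
    PySem.List.insert xs 0 x = x :: xs := by
  simp [PySem.List.insert, PySem.List.sliceIndices]
theorem pv_foldl_app (xs : List (List String)) :
    xs.foldl (fun a x => a ++ [x]) ([] : List (List String)) = xs := by
  simpa using PySem.List.foldl_append_singleton xs ([] : List (List String))
theorem pv_main (data : List (List String)) (h : data ≠ []) :
    unique_names data = unique_names_alt data := by
  obtain ⟨d0, t, rfl⟩ : ∃ d0 t, data = d0 :: t := by
    cases data with
    | nil => exact absurd rfl h
    | cons d0 t => exact ⟨d0, t, rfl⟩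
  simp only [unique_names, unique_names_alt]
  rw [PySem.List.slice_from_one, PySem.List.pyGetD_zero_cons, pv_insert_zero, pv_foldl_app]
  simp only [List.tail_cons]
  congr 1
  have hkeys := pv_keys_eq t PySem.Dict.empty PySem.Dict.empty
    (by rw [PySem.Dict.keys_empty, PySem.Dict.keys_empty])
  have hndG := pvG_nodup t
  have hndA : (t.foldl pvAStep PySem.Dict.empty).keys.Nodup := hkeys ▸ hndG
  rw [PySem.Dict.values_eq_map_keys _ hndA [], PySem.Dict.values_eq_map_keys _ hndG [],
      hkeys, List.map_map]
  apply List.map_congr_left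
  intro k hk
  have hne := pvG_mem_keys_filt t k hk
  cases hflt : pvFilt t k with
  | nil => exact absurd hflt hne
  | cons f rest =>
    have hA : (t.foldl pvAStep PySem.Dict.empty).getD k [] = rest.foldl pvAUpd f := by
      rw [PySem.Dict.getD_eq_get?_getD, pvA_get? t k, hflt]
      rfl
    show (t.foldl pvAStep PySem.Dict.empty).getD k []
        = pvMerge ((t.foldl pvGStep PySem.Dict.empty).getD k [])
    rw [hA, pvG_getD t k, hflt]
    exact pv_crux rest f

-- ===== VERDICT (by name: the statement is the Claim_ definition above) =====
theorem unique_names_spec : Claim_equal_unique_names := by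
  intro data _ hpre
  unfold Spec_unique_names
  exact pv_main data hpre.1
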